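-- pv_equiv track=rewrite | github.com/J-millar99/algorithm | Programmers/Lv0/수조작하기1.py | solution
-- ===== SOURCE A (Python) =====
-- def solution(n, control):
--     for cmd in control:
--         if cmd == 'w':
--             n = n + 1
--         elif cmd == 's':
--             n = n - 1
--         elif cmd == 'a':
--             n = n - 10
--         elif cmd == 'd':
--             n = n + 10
--     return n
-- ===== SOURCE B (Python) =====
-- def solution(n, control):
--     # count-then-closed-form: no per-character branching loop
--     return (n + control.count('w') - control.count('s')
--               - 10 * control.count('a') + 10 * control.count('d'))
-- ===== Notes on version B (the rewrite author's own statement) =====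
-- stated objective: faster
-- what changed: Replaced the per-character branching loop by four str.count tallies combined in one closed-form arithmetic expression.
import Mathlib
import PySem

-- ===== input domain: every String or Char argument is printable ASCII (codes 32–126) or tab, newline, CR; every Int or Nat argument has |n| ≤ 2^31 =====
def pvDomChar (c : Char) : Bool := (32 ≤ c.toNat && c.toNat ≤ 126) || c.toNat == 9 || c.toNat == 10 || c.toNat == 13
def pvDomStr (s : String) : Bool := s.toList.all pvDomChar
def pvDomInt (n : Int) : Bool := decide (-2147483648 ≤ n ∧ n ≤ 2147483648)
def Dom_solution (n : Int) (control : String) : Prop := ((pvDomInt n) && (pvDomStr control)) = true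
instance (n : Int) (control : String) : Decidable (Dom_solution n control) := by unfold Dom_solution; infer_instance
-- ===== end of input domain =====

-- B replaces the branching loop by four str.count tallies in one closed-form expression (idiomatic).

-- ===== PORT A =====
def solution (n : Int) (control : String) : Int :=
  control.toList.foldl
    (fun n cmd =>
      if cmd = 'w' then n + 1
      else if cmd = 's' then n - 1
      else if cmd = 'a' then n - 10
      else if cmd = 'd' then n + 10
      else n) n

-- ===== PORT B =====
def solution_alt (n : Int) (control : String) : Int :=
  n + (PySem.Str.count control "w" : Int) - (PySem.Str.count control "s" : Int)
    - 10 * (PySem.Str.count control "a" : Int) + 10 * (PySem.Str.count control "d" : Int)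

-- ===== PRECONDITION & SPEC =====
def Spec_solution (n : Int) (control : String) (out : Int) : Prop := out = solution_alt n control
instance (n : Int) (control : String) (out : Int) : Decidable (Spec_solution n control out) := by unfold Spec_solution; infer_instance

-- ===== CLAIM (what is proved, stated in full; the proofs are below) =====
def Claim_equal_solution : Prop := ∀ (n : Int) (control : String), Dom_solution n control → Spec_solution n control (solution n control)

-- ===== LEMMAS AND PROOFS =====

-- str.count's fuelled scanner with a single-character needle equals List.count
theorem chars_count_go_singleton (c : Char) (fuel : Nat) (l : List Char) (acc : Nat)
    (h : l.length ≤ fuel) :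
    PySem.Chars.count.go [c] fuel l acc = acc + l.count c := by
  induction fuel generalizing l acc with
  | zero =>
    interval_cases hl : l.length
    · simp_all [List.length_eq_zero_iff.mp hl, PySem.Chars.count.go]
  | succ fuel ih =>
    cases l with
    | nil => simp [PySem.Chars.count.go]
    | cons x xs =>
      simp only [PySem.Chars.count.go, List.count_cons]
      by_cases hx : x = c
      · subst hx
        simp only [List.length_cons] at h
        rw [if_pos (by simp [List.isPrefixOf]),
          show List.drop [x].length (x :: xs) = xs by simp,
          ih xs (acc + 1) (by omega)]
        simp
        omega
      · have hcx : ¬ c = x := fun e => hx e.symm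
        rw [if_neg (by simp [List.isPrefixOf]; exact hcx), ih xs acc (by simp at h; omega)]
        simp [hcx]
        exact hx

-- str.count with a single-character needle equals List.count of that character
theorem chars_count_singleton (s : List Char) (c : Char) :
    PySem.Chars.count s [c] = s.count c := by
  simp [PySem.Chars.count, chars_count_go_singleton c s.length s 0 le_rfl]

theorem solution_loop_eq (n : Int) (l : List Char) :
    l.foldl
      (fun n cmd =>
        if cmd = 'w' then n + 1
        else if cmd = 's' then n - 1
        else if cmd = 'a' then n - 10
        else if cmd = 'd' then n + 10
        else n) n
    = n + (l.count 'w' : Int) - (l.count 's' : Int)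
        - 10 * (l.count 'a' : Int) + 10 * (l.count 'd' : Int) := by
  induction l generalizing n with
  | nil => simp
  | cons x xs ih =>
    simp only [List.foldl_cons, List.count_cons, ih]
    by_cases hw : x = 'w' <;> by_cases hs : x = 's' <;> by_cases ha : x = 'a' <;>
      by_cases hd : x = 'd' <;> simp_all <;> ring

-- ===== VERDICT (by name: the statement is the Claim_ definition above) =====
theorem solution_spec : Claim_equal_solution := by
  intro n control _
  unfold Spec_solution solution solution_alt
  rw [solution_loop_eq]
  have h : ∀ c : Char, PySem.Str.count control (String.ofList [c]) = control.toList.count c := by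
    intro c; rw [PySem.Str.count_eq]
    simpa using chars_count_singleton control.toList c
  have hw := h 'w'; have hs := h 's'; have ha := h 'a'; have hd := h 'd'
  simp only [show ("w" : String) = String.ofList ['w'] from rfl,
    show ("s" : String) = String.ofList ['s'] from rfl,
    show ("a" : String) = String.ofList ['a'] from rfl,
    show ("d" : String) = String.ofList ['d'] from rfl, hw, hs, ha, hd]
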